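-- pv_equiv track=rewrite | github.com/chun-mura/tomd-cli | src/tomd/office.py | _add_pptx_slide_separators
-- ===== SOURCE A (Python) =====
-- def _add_pptx_slide_separators(text: str) -> str:
--     """Insert horizontal rules (---) between pptx slides.
--
--     MarkItDown outputs ``<!-- Slide number: N -->`` comments.
--     This function adds ``---`` before each slide comment (except the first)
--     to visually separate slides in the Markdown output.
--     """
--     lines = text.split("\n")
--     result: list[str] = []
--     first_slide = True
--     for line in lines:
--         if line.strip().startswith("<!-- Slide number:"):
--             if first_slide:
--                 first_slide = False
--             else:
--                 if result and result[-1].strip():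
--                     result.append("")
--                 result.append("---")
--                 result.append("")
--         result.append(line)
--     return "\n".join(result)
-- ===== SOURCE B (Python) =====
-- def _add_pptx_slide_separators(text: str) -> str:
--     """Group-based re-implementation: partition the lines into a leading
--     group plus one group per slide comment, then join the groups with
--     separators (skipping the separator before the first slide group)."""
--     lines = text.split("\n")
--     groups: list[list[str]] = []
--     cur: list[str] = []
--     for line in lines:
--         if line.strip().startswith("<!-- Slide number:"):
--             groups.append(cur)
--             cur = [line]
--         else:
--             cur.append(line)
--     groups.append(cur)
--     out = list(groups[0])
--     if len(groups) >= 2: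
--         out.extend(groups[1])
--         for g in groups[2:]:
--             if out and out[-1].strip():
--                 out.append("")
--             out.extend(["---", ""])
--             out.extend(g)
--     return "\n".join(out)
-- ===== Notes on version B (the rewrite author's own statement) =====
-- stated objective: alternative
-- what changed: Replaced A's single scan with a first_slide flag and result[-1] look-back by an explicit two-phase decomposition: partition the lines into a leading group plus one group per slide comment, then fold the groups together, emitting the separator (conditional blank line, '---', blank line) before every slide group except the first.
import Mathlib
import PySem

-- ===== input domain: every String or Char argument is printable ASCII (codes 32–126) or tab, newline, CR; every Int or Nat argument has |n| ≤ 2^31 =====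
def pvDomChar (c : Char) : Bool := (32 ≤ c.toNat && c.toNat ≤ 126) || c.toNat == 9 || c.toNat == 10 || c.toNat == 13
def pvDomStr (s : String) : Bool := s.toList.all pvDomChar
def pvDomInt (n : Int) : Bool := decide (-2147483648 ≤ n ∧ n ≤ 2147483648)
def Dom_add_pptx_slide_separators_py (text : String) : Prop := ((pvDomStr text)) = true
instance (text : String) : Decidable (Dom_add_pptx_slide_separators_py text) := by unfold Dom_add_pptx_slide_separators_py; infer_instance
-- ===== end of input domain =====

-- B replaces A's first_slide-flag scan by an explicit slide-group decomposition
-- (partition the lines into groups at slide comments, then join the groups with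
-- separators); objective: alternative decomposition, same cost.

-- line.strip().startswith("<!-- Slide number:")  (predicate both Pythons test)
def pvIsSlide (line : String) : Bool :=
  PySem.Str.startswith (PySem.Str.strip line) "<!-- Slide number:"

-- 'if out and out[-1].strip(): append("")'  (conditional blank line, in both Pythons)
def pvSep (out : List String) : List String :=
  if (match out.getLast? with
      | some l => !(PySem.Str.strip l == "")
      | none => false) then [""] else []

-- ===== PORT A =====
-- the loop body of A, state = (result, first_slide)
def pvStepA (st : List String × Bool) (line : String) : List String × Bool :=
  if pvIsSlide line then
    if st.2 then (st.1 ++ [line], false)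
    else (st.1 ++ pvSep st.1 ++ ["---", ""] ++ [line], false)
  else (st.1 ++ [line], st.2)

def add_pptx_slide_separators_py (text : String) : String :=
  let lines := (PySem.Str.split? text "\n").getD []   -- sep ≠ "", so split? is some
  let st := lines.foldl pvStepA ([], true)
  PySem.Str.join "\n" st.1

-- ===== PORT B =====
-- partition into groups, opening a new group at each slide-comment line
def pvGroupsAux : List String → List String → List (List String)
  | [], cur => [cur.reverse]
  | l :: ls, cur =>
    if pvIsSlide l then cur.reverse :: pvGroupsAux ls [l]
    else pvGroupsAux ls (l :: cur)

-- separator-emitting accumulation over the slide groups after the first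
def pvStepB (out : List String) (g : List String) : List String :=
  out ++ pvSep out ++ ["---", ""] ++ g

def add_pptx_slide_separators_py_alt (text : String) : String :=
  let lines := (PySem.Str.split? text "\n").getD []   -- sep ≠ "", so split? is some
  let groups := pvGroupsAux lines []
  let out :=
    match groups with
    | [] => []                 -- unreachable: pvGroupsAux never returns []
    | [g0] => g0
    | g0 :: g1 :: gs => gs.foldl pvStepB (g0 ++ g1)
  PySem.Str.join "\n" out

-- ===== PRECONDITION & SPEC =====
def Spec_add_pptx_slide_separators_py (text : String) (out : String) : Prop := out = add_pptx_slide_separators_py_alt text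
instance (text : String) (out : String) : Decidable (Spec_add_pptx_slide_separators_py text out) := by unfold Spec_add_pptx_slide_separators_py; infer_instance

-- ===== CLAIM (what is proved, stated in full; the proofs are below) =====
def Claim_equal_add_pptx_slide_separators_py : Prop := ∀ (text : String), Dom_add_pptx_slide_separators_py text → Spec_add_pptx_slide_separators_py text (add_pptx_slide_separators_py text)

-- ===== LEMMAS AND PROOFS =====

theorem pvGroupsAux_ne_nil (ls : List String) : ∀ cur, pvGroupsAux ls cur ≠ [] := by
  induction ls with
  | nil => intro cur; simp [pvGroupsAux]
  | cons l ls ih =>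
    intro cur
    by_cases h : pvIsSlide l = true <;> simp [pvGroupsAux, h, ih]

-- A's fold after the first slide comment = B's group fold
theorem pv_foldA_false (ls : List String) : ∀ (cur res : List String),
    (ls.foldl pvStepA (res ++ cur.reverse, false)).1 =
      (match pvGroupsAux ls cur with
       | [] => res
       | g0 :: gs => gs.foldl pvStepB (res ++ g0)) := by
  induction ls with
  | nil => intro cur res; simp [pvGroupsAux]
  | cons l ls ih =>
    intro cur res
    by_cases h : pvIsSlide l = true
    · have hstep : pvStepA (res ++ cur.reverse, false) l
          = ((res ++ cur.reverse ++ pvSep (res ++ cur.reverse) ++ ["---", ""]) ++ [l], false) := by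
        simp [pvStepA, h, List.append_assoc]
      have ih' := ih [l] (res ++ cur.reverse ++ pvSep (res ++ cur.reverse) ++ ["---", ""])
      simp only [List.reverse_singleton] at ih'
      simp only [List.foldl_cons, hstep, pvGroupsAux, h, if_true]
      rw [ih']
      cases hg : pvGroupsAux ls [l] with
      | nil => exact absurd hg (pvGroupsAux_ne_nil _ _)
      | cons g1 gs1 => simp [pvStepB, List.append_assoc]
    · have hstep : pvStepA (res ++ cur.reverse, false) l = (res ++ (l :: cur).reverse, false) := by
        simp [pvStepA, h, List.append_assoc]
      simp only [List.foldl_cons, hstep, pvGroupsAux, h, Bool.false_eq_true, if_false]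
      exact ih (l :: cur) res

-- A's fold from the initial (first_slide = True) state = B's combine of the group list
theorem pv_foldA_true (ls : List String) : ∀ (cur res : List String),
    (ls.foldl pvStepA (res ++ cur.reverse, true)).1 =
      (match pvGroupsAux ls cur with
       | [] => res
       | [g0] => res ++ g0
       | g0 :: g1 :: gs => gs.foldl pvStepB (res ++ g0 ++ g1)) := by
  induction ls with
  | nil => intro cur res; simp [pvGroupsAux]
  | cons l ls ih =>
    intro cur res
    by_cases h : pvIsSlide l = true
    · have hstep : pvStepA (res ++ cur.reverse, true) l = ((res ++ cur.reverse) ++ [l], false) := by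
        simp [pvStepA, h]
      have hf := pv_foldA_false ls [l] (res ++ cur.reverse)
      simp only [List.reverse_singleton] at hf
      simp only [List.foldl_cons, hstep, pvGroupsAux, h, if_true]
      rw [hf]
      cases hg : pvGroupsAux ls [l] with
      | nil => exact absurd hg (pvGroupsAux_ne_nil _ _)
      | cons g1 gs1 => simp [List.append_assoc]
    · have hstep : pvStepA (res ++ cur.reverse, true) l = (res ++ (l :: cur).reverse, true) := by
        simp [pvStepA, h, List.append_assoc]
      simp only [List.foldl_cons, hstep, pvGroupsAux, h, Bool.false_eq_true, if_false]
      exact ih (l :: cur) res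

-- ===== VERDICT (by name: the statement is the Claim_ definition above) =====
theorem add_pptx_slide_separators_py_spec : Claim_equal_add_pptx_slide_separators_py := by
  intro text _
  unfold Spec_add_pptx_slide_separators_py add_pptx_slide_separators_py add_pptx_slide_separators_py_alt
  dsimp only
  congr 1
  have := pv_foldA_true ((PySem.Str.split? text "\n").getD []) [] []
  simp only [List.reverse_nil, List.append_nil] at this
  rw [this]
  cases hg : pvGroupsAux ((PySem.Str.split? text "\n").getD []) [] with
  | nil => exact absurd hg (pvGroupsAux_ne_nil _ _)
  | cons g0 gs =>
    cases gs with
    | nil => simp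
    | cons g1 gs1 => simp
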